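-- pv_equiv track=rewrite | github.com/Farbodch/set_kbsa | auxiliary_utils/mpi_management.py | get_total_num_of_padding
-- ===== SOURCE A (Python) =====
-- def get_total_num_of_padding(N: int=1,
--                             size: int=1) -> int:
--
--     max_jobs = (N + size - 1) // size
--     total_num_of_padding = 0
--     for r in range(size):
--         indices = range(r, N, size)
--         if len(indices) < max_jobs:
--             total_num_of_padding += 1
--     return total_num_of_padding
-- ===== SOURCE B (Python) =====
-- def get_total_num_of_padding(N: int = 1, size: int = 1) -> int:
--     # Closed form: with size positive ranks 0..size-1 get ceil(N/size) or floor(N/size)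
--     # jobs; exactly size - N % size ranks fall short when N % size != 0.
--     if size <= 0 or N <= 0:
--         return 0
--     r = N % size
--     return 0 if r == 0 else size - r
-- ===== Notes on version B (the rewrite author's own statement) =====
-- stated objective: faster
-- what changed: Replaced the O(size) loop that measures each rank's range length with the O(1) closed form size - N % size (0 when N % size == 0 or N <= 0 or size < 0).
import Mathlib
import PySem

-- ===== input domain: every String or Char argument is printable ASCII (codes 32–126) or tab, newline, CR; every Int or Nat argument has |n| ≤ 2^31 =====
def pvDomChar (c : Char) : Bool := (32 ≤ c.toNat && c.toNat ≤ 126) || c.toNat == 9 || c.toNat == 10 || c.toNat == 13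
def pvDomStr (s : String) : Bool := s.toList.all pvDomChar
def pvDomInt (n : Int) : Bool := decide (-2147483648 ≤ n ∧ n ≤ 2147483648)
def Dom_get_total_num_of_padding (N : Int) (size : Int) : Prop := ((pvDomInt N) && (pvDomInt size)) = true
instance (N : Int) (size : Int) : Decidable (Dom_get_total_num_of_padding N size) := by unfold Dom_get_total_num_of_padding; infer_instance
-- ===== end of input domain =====

-- B replaces A's O(size) loop over all ranks by the O(1) closed form size - N % size.

-- ===== PORT A =====
-- len(range(a, b, step)): CPython computes this length by O(1) arithmetic (it never
-- materialises the range); this helper is that exact computation ('step' here is the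
-- loop's 'size', positive whenever the loop body runs).
def pvRangeLen (a b step : Int) : Int :=
  if 0 < step then (if a < b then (b - a + step - 1) / step else 0)
  else (if b < a then (a - b - step - 1) / (-step) else 0)

def get_total_num_of_padding (N : Int) (size : Int) : Int :=
  let max_jobs := PySem.Int.floordiv (N + size - 1) size
  (PySem.List.pyRange 0 size 1).foldl
    (fun acc r =>
      if pvRangeLen r N size < max_jobs then acc + 1 else acc) 0

-- ===== PORT B =====
def get_total_num_of_padding_alt (N : Int) (size : Int) : Int :=
  if size ≤ 0 ∨ N ≤ 0 then 0
  else
    let r := PySem.Int.mod N size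
    if r = 0 then 0 else size - r

-- ===== PRECONDITION & SPEC =====
-- A performs '// size', which raises ZeroDivisionError when size = 0.
def Pre_get_total_num_of_padding (N : Int) (size : Int) : Prop := size ≠ 0
instance (N : Int) (size : Int) : Decidable (Pre_get_total_num_of_padding N size) := by unfold Pre_get_total_num_of_padding; infer_instance
def pvWitness_get_total_num_of_padding : Int × Int := (10, 3)

def Spec_get_total_num_of_padding (N : Int) (size : Int) (out : Int) : Prop := out = get_total_num_of_padding_alt N size
instance (N : Int) (size : Int) (out : Int) : Decidable (Spec_get_total_num_of_padding N size out) := by unfold Spec_get_total_num_of_padding; infer_instance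

-- ===== CLAIM (what is proved, stated in full; the proofs are below) =====
def Claim_equal_get_total_num_of_padding : Prop := ∀ (N : Int) (size : Int), Dom_get_total_num_of_padding N size → Pre_get_total_num_of_padding N size → Spec_get_total_num_of_padding N size (get_total_num_of_padding N size)
-- ===== LEMMAS AND PROOFS =====

-- With 0 < size and 0 ≤ r < size, rank r's range falls short of max_jobs
-- exactly when 0 < N, N % size ≠ 0 and N % size ≤ r.
lemma pv_short_iff (N size r : Int) (hs : 0 < size) (hr0 : 0 ≤ r) (hrs : r < size) :
    (pvRangeLen r N size < PySem.Int.floordiv (N + size - 1) size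
      ↔ (0 < N ∧ N % size ≠ 0 ∧ N % size ≤ r)) := by
  have hdm := Int.ediv_add_emod N size
  have hm0 : 0 ≤ N % size := Int.emod_nonneg N (by omega)
  have hms : N % size < size := Int.emod_lt_of_pos N hs
  set q := N / size with hq
  set m := N % size with hm
  rw [PySem.Int.floordiv_eq_ediv_of_pos hs]
  unfold pvRangeLen
  rw [if_pos hs]
  -- compute max_jobs
  have hmax : (N + size - 1) / size = if m = 0 then q else q + 1 := by
    by_cases h0 : m = 0
    · have : N + size - 1 = (size - 1) + size * q := by omega
      rw [this, Int.add_mul_ediv_left _ _ (by omega : size ≠ 0),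
          Int.ediv_eq_zero_of_lt (by omega) (by omega)]
      simp [h0]
    · have : N + size - 1 = (m + size - 1) + size * q := by omega
      rw [this, Int.add_mul_ediv_left _ _ (by omega : size ≠ 0)]
      have : (m + size - 1) / size = 1 := by
        have h1 : m + size - 1 = (m - 1) + size * 1 := by ring
        rw [h1, Int.add_mul_ediv_left _ _ (by omega : size ≠ 0),
            Int.ediv_eq_zero_of_lt (by omega) (by omega)]
        omega
      rw [this]
      simp [h0, Int.add_comm]
  by_cases hrN : r < N
  · -- q ≥ 0 here since 0 ≤ r < N
    have hN : 0 < N := by omega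
    have hq0 : 0 ≤ q := Int.ediv_nonneg (by omega) (by omega)
    have hlen : (N - r + size - 1) / size = if r < m then q + 1 else q := by
      by_cases hrm : r < m
      · have : N - r + size - 1 = (m - 1 - r) + size * (q + 1) := by ring_nf; omega
        rw [this, Int.add_mul_ediv_left _ _ (by omega : size ≠ 0),
            Int.ediv_eq_zero_of_lt (by omega) (by omega)]
        simp [hrm]
      · have : N - r + size - 1 = (m + size - 1 - r) + size * q := by omega
        rw [this, Int.add_mul_ediv_left _ _ (by omega : size ≠ 0),
            Int.ediv_eq_zero_of_lt (by omega) (by omega)]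
        simp [hrm]
    rw [if_pos hrN, hlen, hmax]
    by_cases h0 : m = 0 <;> by_cases hrm : r < m <;> simp [h0, hrm] <;> omega
  · -- r ≥ N: empty range for rank r
    rw [if_neg hrN, hmax]
    push_neg at hrN
    by_cases h0 : m = 0
    · rw [if_pos h0]
      constructor
      · intro hgt
        exfalso
        have hle : size * 1 ≤ size * q := mul_le_mul_of_nonneg_left (by omega) (by omega)
        have hle' : size ≤ size * q := by simpa using hle
        omega
      · intro h
        exact absurd h0 h.2.1
    · rw [if_neg h0]
      constructor
      · intro hgt
        have hsq : 0 ≤ size * q := mul_nonneg (by omega) (by omega)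
        exact ⟨by omega, h0, by omega⟩
      · intro h
        have hq2 : 0 ≤ q := Int.ediv_nonneg (by omega) (by omega)
        have hsq : 0 ≤ size * q := mul_nonneg (by omega) hq2
        omega

theorem get_total_num_of_padding_spec : Claim_equal_get_total_num_of_padding := by
  intro N size _ hpre
  unfold Spec_get_total_num_of_padding get_total_num_of_padding get_total_num_of_padding_alt
  have hpre' : size ≠ 0 := hpre
  rcases lt_or_gt_of_ne hpre' with hneg | hpos
  · -- size < 0: A's loop body never runs and B returns 0
    rw [PySem.List.pyRange_one_eq_nil (by omega)]
    simp [List.foldl_nil, if_pos (Or.inl (le_of_lt hneg))]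
  · -- size > 0
    have hcount :
        (PySem.List.pyRange 0 size 1).foldl
          (fun acc r =>
            if pvRangeLen r N size
                < PySem.Int.floordiv (N + size - 1) size then acc + 1 else acc) 0
        = ((PySem.List.pyRange 0 size 1).countP
            (fun r => decide (0 < N ∧ N % size ≠ 0 ∧ N % size ≤ r)) : Int) := by
      have := PySem.List.foldl_count_if
        (fun r => decide (pvRangeLen r N size
          < PySem.Int.floordiv (N + size - 1) size)) (PySem.List.pyRange 0 size 1) 0
      simp only [decide_eq_true_eq] at this
      rw [this, zero_add]
      congr 1
      apply List.countP_congr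
      intro r hr
      rw [PySem.List.mem_pyRange_one] at hr
      simp only [decide_eq_true_eq]
      exact pv_short_iff N size r hpos hr.1 hr.2
    rw [hcount]
    have hm0 : 0 ≤ N % size := Int.emod_nonneg N (by omega)
    have hms : N % size < size := Int.emod_lt_of_pos N hpos
    by_cases hN : N ≤ 0
    · -- B returns 0; the predicate is everywhere false
      rw [if_pos (Or.inr hN)]
      have : (PySem.List.pyRange 0 size 1).countP
          (fun r => decide (0 < N ∧ N % size ≠ 0 ∧ N % size ≤ r)) = 0 := by
        rw [List.countP_eq_zero]
        intro a _
        simp only [decide_eq_true_eq]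
        push_neg
        intro h; omega
      rw [this]; simp
    · push_neg at hN
      rw [if_neg (by push_neg; omega)]
      by_cases hmz : PySem.Int.mod N size = 0
      · -- N divisible by size: no padding
        have hmz' : N % size = 0 := by rwa [PySem.Int.mod_eq_emod_of_pos hpos] at hmz
        rw [if_pos hmz]
        have : (PySem.List.pyRange 0 size 1).countP
            (fun r => decide (0 < N ∧ N % size ≠ 0 ∧ N % size ≤ r)) = 0 := by
          rw [List.countP_eq_zero]
          intro a _
          simp only [decide_eq_true_eq]
          push_neg
          intro _ h; exact absurd hmz' h
        rw [this]; simp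
      · -- padding = size - N % size
        have hmz' : N % size ≠ 0 := by rwa [PySem.Int.mod_eq_emod_of_pos hpos] at hmz
        rw [if_neg hmz, PySem.Int.mod_eq_emod_of_pos hpos]
        rw [PySem.List.pyRange_one_append 0 (N % size) size (by omega) (by omega),
            List.countP_append]
        have h1 : (PySem.List.pyRange 0 (N % size) 1).countP
            (fun r => decide (0 < N ∧ N % size ≠ 0 ∧ N % size ≤ r)) = 0 := by
          rw [List.countP_eq_zero]
          intro a ha
          rw [PySem.List.mem_pyRange_one] at ha
          simp only [decide_eq_true_eq]
          push_neg
          intro _ _; omega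
        have h2 : (PySem.List.pyRange (N % size) size 1).countP
            (fun r => decide (0 < N ∧ N % size ≠ 0 ∧ N % size ≤ r))
            = (PySem.List.pyRange (N % size) size 1).length := by
          rw [List.countP_eq_length]
          intro a ha
          rw [PySem.List.mem_pyRange_one] at ha
          simp only [decide_eq_true_eq]
          exact ⟨hN, hmz', ha.1⟩
        rw [h1, h2, PySem.List.length_pyRange_one, Nat.zero_add]
        exact Int.toNat_of_nonneg (by omega)
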